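-- pv_equiv track=rewrite | github.com/DongliangLu1995/Summer_Research-CBS | read_final_rule_version3.py | find_bracket
-- ===== SOURCE A (Python) =====
-- def find_bracket(citation):
--     contain_bra=0
--     for i in range(len(citation)):
--         if citation[i]=="(":
--             if contain_bra==0:
--                 s=i
--             contain_bra+=1
--         if citation[i]==")":
--             if contain_bra!=0:
--                 if contain_bra==1:
--                     e=i
--                     return s,e
--                 else:
--                     contain_bra-=1
--             else:
--                 pass
--     return s,len(citation)
-- ===== SOURCE B (Python) =====
-- def find_bracket(citation):
--     # phase 1: locate the first opening parenthesis
--     s = citation.index("(")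
--     # phase 2: tokenize the rest on ')' and compare cumulative counts:
--     # the k-th ')' (1-based) closes the outermost pair exactly when the number of
--     # '(' seen so far equals k; segment lengths recover its index.
--     segs = citation[s:].split(")")
--     opens = 0
--     closes = 0
--     pos = s
--     for seg in segs[:-1]:
--         opens += seg.count("(")
--         closes += 1
--         pos += len(seg)          # pos is now the index of this ')'
--         if opens == closes:
--             return s, pos
--         pos += 1                 # step over the ')'
--     return s, len(citation)
-- ===== Notes on version B (the rewrite author's own statement) =====
-- stated objective: alternative
-- what changed: Replaces A's per-character depth-counter scan by tokenization: the tail from the first '(' is split on ')', and a fold over the segments compares the cumulative count of '(' with the number of ')' tokens consumed, recovering the close index from segment lengths.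
import Mathlib
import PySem

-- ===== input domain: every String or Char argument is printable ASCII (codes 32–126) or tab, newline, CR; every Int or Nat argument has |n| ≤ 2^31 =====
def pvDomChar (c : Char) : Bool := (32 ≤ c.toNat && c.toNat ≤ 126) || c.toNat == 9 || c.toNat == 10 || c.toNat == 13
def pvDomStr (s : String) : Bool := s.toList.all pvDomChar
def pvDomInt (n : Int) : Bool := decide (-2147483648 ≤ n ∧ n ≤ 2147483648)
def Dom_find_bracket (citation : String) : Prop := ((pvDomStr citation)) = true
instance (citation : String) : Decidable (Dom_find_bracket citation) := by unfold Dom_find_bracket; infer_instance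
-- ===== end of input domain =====

-- B replaces A's per-character depth-counter scan by splitting the tail from the first '('
-- on ')' and folding over the segments, comparing cumulative '(' counts with the number of
-- ')' tokens consumed; objective: alternative.

-- ===== PORT A =====
-- A's single for-loop over range(len(citation)); an unassigned `s` is modelled by
-- Option (none = Python's unbound `s`); the final `return s, len(citation)` with s
-- unbound is Python's UnboundLocalError, excluded by Pre_ (getD 0 is never reached there).
def findBracketLoopA (len : Int) : List Char → Int → Int → Option Int → Int × Int
  | [], _, _, s => (s.getD 0, len)
  | c :: rest, i, cb, s =>
    let s' := if c = '(' then (if cb = 0 then some i else s) else s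
    let cb' := if c = '(' then cb + 1 else cb
    if c = ')' then
      if cb' ≠ 0 then
        if cb' = 1 then (s'.getD 0, i)
        else findBracketLoopA len rest (i + 1) (cb' - 1) s'
      else findBracketLoopA len rest (i + 1) cb' s'
    else findBracketLoopA len rest (i + 1) cb' s'

def find_bracket (citation : String) : Int × Int :=
  findBracketLoopA (PySem.Str.len citation) citation.toList 0 0 none

-- ===== PORT B =====
-- Source B's `for seg in segs[:-1]` loop with state (opens, closes, pos)
def segLoopB (s len : Int) : List (List Char) → Int → Int → Int → Int × Int
  | [], _, _, _ => (s, len)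
  | seg :: rest, opens, closes, pos =>
    let opens' := opens + (seg.count '(' : Int)
    let closes' := closes + 1
    let pos' := pos + (seg.length : Int)
    if opens' = closes' then (s, pos')
    else segLoopB s len rest opens' closes' (pos' + 1)

def find_bracket_alt (citation : String) : Int × Int :=
  let cs := citation.toList
  match PySem.List.index? cs '(' with
  | none => (0, 0)   -- citation.index("(") raises ValueError here; outside Pre_
  | some s =>
    let segs := (cs.drop s).splitOn ')'   -- citation[s:].split(")"), single-char separator
    segLoopB (s : Int) (PySem.Str.len citation) segs.dropLast 0 0 (s : Int)

-- ===== PRECONDITION & SPEC =====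
-- Pre_ excludes strings with no opening parenthesis: there A raises UnboundLocalError and B raises ValueError.
def Pre_find_bracket (citation : String) : Prop := '(' ∈ citation.toList
instance (citation : String) : Decidable (Pre_find_bracket citation) := by unfold Pre_find_bracket; infer_instance
def pvWitness_find_bracket : String := "a(b(c))d"

def Spec_find_bracket (citation : String) (out : Int × Int) : Prop := out = find_bracket_alt citation
instance (citation : String) (out : Int × Int) : Decidable (Spec_find_bracket citation out) := by unfold Spec_find_bracket; infer_instance

-- ===== CLAIM (what is proved, stated in full; the proofs are below) =====
def Claim_equal_find_bracket : Prop := ∀ (citation : String), Dom_find_bracket citation → Pre_find_bracket citation → Spec_find_bracket citation (find_bracket citation)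

-- ===== LEMMAS AND PROOFS =====

-- scanning a '('-free prefix leaves A's loop state (cb = 0, s unset) unchanged
theorem loopA_skip (len : Int) (pre l : List Char) (hpre : '(' ∉ pre) :
    ∀ i : Int, findBracketLoopA len (pre ++ l) i 0 none = findBracketLoopA len l (i + pre.length) 0 none := by
  induction pre with
  | nil => intro i; simp
  | cons c rest ih =>
    intro i
    have hc : c ≠ '(' := fun h => hpre (h ▸ List.mem_cons_self)
    have hr : '(' ∉ rest := fun h => hpre (List.mem_cons_of_mem _ h)
    simp only [List.cons_append, findBracketLoopA, if_neg hc]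
    by_cases hcr : c = ')' <;> simp only [if_pos, if_neg, hcr, ne_eq,
      not_true, not_false_iff] <;>
      · rw [ih hr]
        congr 1
        push_cast [List.length_cons]
        omega

-- scanning a ')'-free segment only advances the index and adds its '(' count to cb
theorem loopA_seg (len si : Int) (seg l : List Char) (hseg : ')' ∉ seg) :
    ∀ (i cb : Int), 1 ≤ cb →
    findBracketLoopA len (seg ++ l) i cb (some si)
      = findBracketLoopA len l (i + seg.length) (cb + (seg.count '(' : Int)) (some si) := by
  induction seg with
  | nil => intro i cb _; simp
  | cons c rest ih =>
    intro i cb hcb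
    have hc : c ≠ ')' := fun h => hseg (h ▸ List.mem_cons_self)
    have hr : ')' ∉ rest := fun h => hseg (List.mem_cons_of_mem _ h)
    by_cases hco : c = '('
    · subst hco
      simp only [List.cons_append, findBracketLoopA, if_neg (by decide : ¬ ('(' = ')')),
        if_neg (by omega : ¬ cb = 0), ite_true]
      rw [ih hr (i + 1) (cb + 1) (by omega)]
      congr 1
      · push_cast [List.length_cons]; omega
      · rw [List.count_cons_self]; push_cast; omega
    · simp only [List.cons_append, findBracketLoopA, if_neg hco, if_neg hc]
      rw [ih hr (i + 1) cb hcb]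
      congr 1
      · push_cast [List.length_cons]; omega
      · rw [List.count_cons_of_ne hco]

-- every chunk of splitOn lacks the separator
theorem splitOn_chunk_not_mem (l : List Char) : ∀ seg ∈ l.splitOn ')', ')' ∉ seg := by
  induction l with
  | nil => simp [List.splitOn]
  | cons c rest ih =>
    intro seg hseg
    simp only [List.splitOn, List.splitOnP_cons] at hseg ih
    by_cases hc : c = ')'
    · rw [if_pos (by simp [hc])] at hseg
      rcases List.mem_cons.mp hseg with h | h
      · subst h; simp
      · exact ih seg h
    · rw [if_neg (by simp [hc])] at hseg
      rcases hsp : rest.splitOnP (· == ')') with _ | ⟨hd, tl⟩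
      · exact absurd hsp (List.splitOnP_ne_nil _ rest)
      · rw [hsp, List.modifyHead_cons] at hseg
        rcases List.mem_cons.mp hseg with h | h
        · subst h
          intro hmem
          rcases List.mem_cons.mp hmem with h' | h'
          · exact hc h'.symm
          · exact ih hd (hsp ▸ List.mem_cons_self) h'
        · exact ih seg (hsp ▸ List.mem_cons_of_mem _ h)

-- intercalate on a two-or-more list unfolds to head ++ sep ++ rest
theorem intercalate_cons₂ (a b : List Char) (t : List (List Char)) :
    List.intercalate [')'] (a :: b :: t) = a ++ ')' :: List.intercalate [')'] (b :: t) := by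
  simp [List.intercalate, List.intersperse_cons₂]

-- main correspondence: A scanning the intercalation of segments, from a segment boundary
-- with cb = opens - closes ≥ 1, computes B's segment fold
theorem loopA_segLoopB (len si : Int) :
    ∀ (segs : List (List Char)), (∀ seg ∈ segs, ')' ∉ seg) →
    ∀ (i opens closes : Int), 1 ≤ opens - closes →
    findBracketLoopA len (List.intercalate [')'] segs) i (opens - closes) (some si)
      = segLoopB si len segs.dropLast opens closes i := by
  intro segs
  induction segs with
  | nil =>
    intro _ i opens closes _
    simp [List.intercalate, findBracketLoopA, segLoopB]
  | cons a rest ih =>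
    intro hnp i opens closes hcb
    have ha : ')' ∉ a := hnp a List.mem_cons_self
    cases rest with
    | nil =>
      have h1 : List.intercalate [')'] [a] = a ++ [] := by
        simp [List.intercalate]
      rw [h1, loopA_seg len si a [] ha i _ hcb]
      simp [findBracketLoopA, segLoopB]
    | cons b t =>
      rw [intercalate_cons₂, loopA_seg len si a _ ha i _ hcb]
      have hm : (1 : Int) ≤ opens - closes + (a.count '(' : Int) := by
        have : (0 : Int) ≤ (a.count '(' : Int) := Int.natCast_nonneg _
        omega
      simp only [findBracketLoopA, if_neg (by decide : ¬ (')' = '(')), ite_true,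
        if_pos (by omega : opens - closes + (a.count '(' : Int) ≠ 0), ne_eq,
        List.dropLast_cons₂, segLoopB]
      by_cases h1 : opens + (a.count '(' : Int) = closes + 1
      · rw [if_pos (by omega : opens - closes + (a.count '(' : Int) = 1), if_pos h1]
        simp
      · rw [if_neg (by omega : ¬ opens - closes + (a.count '(' : Int) = 1), if_neg h1]
        have harg : opens - closes + (a.count '(' : Int) - 1
            = (opens + (a.count '(' : Int)) - (closes + 1) := by omega
        rw [harg]
        have := ih (fun seg hs => hnp seg (List.mem_cons_of_mem _ hs))
          (i + (a.length : Int) + 1) (opens + (a.count '(' : Int)) (closes + 1) (by omega)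
        rw [this]

-- B's fold starting at the full first chunk '(' :: r equals it starting past the '(' with opens = 1
theorem segLoopB_open (k len : Int) (r : List Char) (rest : List (List Char)) :
    segLoopB k len ((('(' :: r) :: rest).dropLast) 0 0 k
      = segLoopB k len ((r :: rest).dropLast) 1 0 (k + 1) := by
  cases rest with
  | nil => simp [segLoopB]
  | cons c t =>
    simp only [List.dropLast_cons₂, segLoopB, List.count_cons_self, List.length_cons]
    push_cast
    split_ifs with h1 h2
    · simp only [Prod.mk.injEq, true_and]; omega
    · exact absurd (by omega : (1 : Int) + (r.count '(' : Int) = 1) h2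
    · exact absurd (by omega : (0 : Int) + ((r.count '(' : Int) + 1) = 1) h1
    · congr 1 <;> omega

theorem find_bracket_spec : Claim_equal_find_bracket := by
  intro citation _ hpre
  unfold Spec_find_bracket find_bracket find_bracket_alt
  have hmem : '(' ∈ citation.toList := hpre
  obtain ⟨k, hk⟩ := Option.isSome_iff_exists.mp ((PySem.List.index?_isSome_iff _ _).mpr hmem)
  obtain ⟨pre, suf, hsplit, hlen, hnp⟩ := (PySem.List.index?_eq_some_iff _ _ _).mp hk
  simp only [hk]
  have hdrop : List.drop k (pre ++ '(' :: suf) = '(' :: suf := by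
    rw [← hlen, List.drop_left]
  -- decompose the split of suf
  rcases hsp : suf.splitOn ')' with _ | ⟨r, rest⟩
  · exact absurd hsp (List.splitOnP_ne_nil _ suf)
  have hchunks : ∀ seg ∈ r :: rest, ')' ∉ seg := fun seg hs =>
    splitOn_chunk_not_mem suf seg (hsp ▸ hs)
  have hsuf : suf = List.intercalate [')'] (r :: rest) := by
    conv_lhs => rw [← List.intercalate_splitOn (xs := suf) ')', hsp]
  -- B's segments: ('(' :: suf).splitOn ')' = ('(' :: r) :: rest
  have hsegsB : ('(' :: suf).splitOn ')' = ('(' :: r) :: rest := by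
    simp only [List.splitOn, List.splitOnP_cons, if_neg (by decide : ¬ (('(' == ')') = true))]
    rw [show suf.splitOnP (· == ')') = r :: rest from hsp, List.modifyHead_cons]
  -- rewrite both sides: skip the '('-free prefix on A's side, expose B's segments
  rw [hsplit, loopA_skip _ pre _ hnp 0, zero_add, hlen, hdrop, hsegsB]
  simp only [findBracketLoopA, if_neg (by decide : ¬ (('(' : Char) = ')')), ite_true]
  rw [segLoopB_open, hsuf, (by norm_num : (0 : Int) + 1 = 1 - 0),
    loopA_segLoopB _ _ (r :: rest) hchunks ((k : Int) + 1) 1 0 (by omega)]
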